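-- pv_equiv track=rewrite | github.com/Kishore007raj/Mail_Shield | backend/app/services/url_analyzer.py | _check_suspicious_tld
-- ===== SOURCE A (Python) =====
-- SUSPICIOUS_TLDS = {
--     ".tk", ".ml", ".ga", ".cf", ".gq",
--     ".xyz", ".top", ".club", ".work", ".buzz",
--     ".loan", ".click", ".download", ".stream",
--     ".racing", ".review", ".win", ".bid",
-- }
--
-- def _check_suspicious_tld(hostname: str) -> dict | None:
--     """Check if the domain uses a suspicious TLD."""
--     hostname_lower = hostname.lower()
--
--     for tld in SUSPICIOUS_TLDS:
--         if hostname_lower.endswith(tld):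
--             return {
--                 "url": hostname,
--                 "issue": "suspicious_tld",
--                 "description": f"Domain uses suspicious TLD '{tld}' commonly associated with phishing",
--                 "severity": "medium"
--             }
--
--     return None
-- ===== SOURCE B (Python) =====
-- SUSPICIOUS_TLDS = {
--     ".tk", ".ml", ".ga", ".cf", ".gq",
--     ".xyz", ".top", ".club", ".work", ".buzz",
--     ".loan", ".click", ".download", ".stream",
--     ".racing", ".review", ".win", ".bid",
-- }
--
-- def _check_suspicious_tld(hostname: str) -> dict | None:
--     """Check if the domain uses a suspicious TLD (single trailing-TLD extraction + set lookup)."""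
--     hostname_lower = hostname.lower()
--     idx = hostname_lower.rfind(".")
--     if idx == -1:
--         return None
--     tld = hostname_lower[idx:]
--     if tld not in SUSPICIOUS_TLDS:
--         return None
--     return {
--         "url": hostname,
--         "issue": "suspicious_tld",
--         "description": f"Domain uses suspicious TLD '{tld}' commonly associated with phishing",
--         "severity": "medium",
--     }
-- ===== Notes on version B (the rewrite author's own statement) =====
-- stated objective: idiomatic
-- what changed: Instead of looping over all 18 suspicious TLDs and calling endswith on each, B extracts the hostname's trailing TLD once (slice from the last dot) and does a single set-membership test (valid because no suspicious TLD is a suffix of another).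
import Mathlib
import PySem

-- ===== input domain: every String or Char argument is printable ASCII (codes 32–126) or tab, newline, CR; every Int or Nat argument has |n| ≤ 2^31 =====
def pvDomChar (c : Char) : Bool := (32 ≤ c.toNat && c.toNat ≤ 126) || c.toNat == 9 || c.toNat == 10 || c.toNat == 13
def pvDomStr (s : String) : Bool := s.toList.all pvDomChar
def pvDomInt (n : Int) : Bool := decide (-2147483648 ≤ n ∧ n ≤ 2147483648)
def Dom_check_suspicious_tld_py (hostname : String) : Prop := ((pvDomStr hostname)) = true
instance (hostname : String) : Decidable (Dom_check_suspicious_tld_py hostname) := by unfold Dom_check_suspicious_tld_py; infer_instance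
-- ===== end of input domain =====

-- B replaces A's loop of per-TLD endswith checks by one extraction of the trailing TLD (slice from the last dot)
-- and a single membership test; same return value (no suspicious TLD is a suffix of another).

-- ===== PORT A =====
-- SUSPICIOUS_TLDS: a Python set of distinct string literals; iteration order does not affect the
-- result (at most one TLD can match), ported as the list of its distinct elements in literal order.
def pvTLDS : List String :=
  [".tk", ".ml", ".ga", ".cf", ".gq",
   ".xyz", ".top", ".club", ".work", ".buzz",
   ".loan", ".click", ".download", ".stream",
   ".racing", ".review", ".win", ".bid"]

def pvDict (hostname tld : String) : List (String × String) :=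
  [("url", hostname), ("issue", "suspicious_tld"),
   ("description", "Domain uses suspicious TLD '" ++ tld ++ "' commonly associated with phishing"),
   ("severity", "medium")]

-- the 'for tld in SUSPICIOUS_TLDS: if … return …' loop
def pvLoopA (hostname hl : String) : List String → Option (List (String × String))
  | [] => none
  | tld :: rest =>
    if PySem.Str.endswith hl tld then some (pvDict hostname tld)
    else pvLoopA hostname hl rest

def check_suspicious_tld_py (hostname : String) : Option (List (String × String)) :=
  let hl := PySem.Str.lower hostname
  pvLoopA hostname hl pvTLDS

-- ===== PORT B =====
def check_suspicious_tld_py_alt (hostname : String) : Option (List (String × String)) :=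
  let hl := PySem.Str.lower hostname
  let idx := PySem.Str.rfind hl "."
  if idx = -1 then none
  else
    let tld := PySem.Str.slice hl (some idx) none
    if pvTLDS.contains tld then some (pvDict hostname tld)
    else none

-- ===== PRECONDITION & SPEC =====
def Spec_check_suspicious_tld_py (hostname : String) (out : Option (List (String × String))) : Prop := out = check_suspicious_tld_py_alt hostname
instance (hostname : String) (out : Option (List (String × String))) : Decidable (Spec_check_suspicious_tld_py hostname out) := by unfold Spec_check_suspicious_tld_py; infer_instance

-- ===== CLAIM (what is proved, stated in full; the proofs are below) =====
def Claim_equal_check_suspicious_tld_py : Prop := ∀ (hostname : String), Dom_check_suspicious_tld_py hostname → Spec_check_suspicious_tld_py hostname (check_suspicious_tld_py hostname)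

-- ===== LEMMAS AND PROOFS =====

-- spec of rfind's fuel loop for a single-char pattern
theorem pvGo_spec (l : List Char) (c : Char) (j : ℕ) :
    (PySem.Chars.rfind.go l [c] j = -1 ∧ ∀ i ≤ j, ¬ [c] <+: l.drop i) ∨
    (∃ k ≤ j, PySem.Chars.rfind.go l [c] j = (k : ℤ) ∧ [c] <+: l.drop k ∧
      ∀ i, k < i → i ≤ j → ¬ [c] <+: l.drop i) := by
  induction j with
  | zero =>
    by_cases h : [c].isPrefixOf l
    · right; exact ⟨0, le_refl _, by simp [PySem.Chars.rfind.go, h],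
        by simpa using (List.isPrefixOf_iff_prefix.mp h), by omega⟩
    · left; refine ⟨by simp [PySem.Chars.rfind.go, h], ?_⟩
      intro i hi; interval_cases i
      simpa using fun hp => h (List.isPrefixOf_iff_prefix.mpr (by simpa using hp))
  | succ j ih =>
    by_cases h : [c].isPrefixOf (l.drop (j + 1))
    · right
      exact ⟨j + 1, le_refl _, by simp [PySem.Chars.rfind.go, h],
        List.isPrefixOf_iff_prefix.mp h, by omega⟩
    · have hnp : ¬ [c] <+: l.drop (j + 1) := fun hp => h (List.isPrefixOf_iff_prefix.mpr hp)
      have hstep : PySem.Chars.rfind.go l [c] (j + 1) = PySem.Chars.rfind.go l [c] j := by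
        simp [PySem.Chars.rfind.go, h]
      rcases ih with ⟨h1, h2⟩ | ⟨k, hk, h1, h2, h3⟩
      · left
        refine ⟨by rw [hstep]; exact h1, ?_⟩
        intro i hi
        rcases Nat.lt_or_ge i (j + 1) with hi' | hi'
        · exact h2 i (by omega)
        · have : i = j + 1 := by omega
          subst this; exact hnp
      · right
        refine ⟨k, by omega, by rw [hstep]; exact h1, h2, ?_⟩
        intro i hlt hle
        rcases Nat.lt_or_ge i (j + 1) with hi' | hi'
        · exact h3 i hlt (by omega)
        · have : i = j + 1 := by omega
          subst this; exact hnp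

theorem pvPrefix_drop_iff (l : List Char) (c : Char) (i : ℕ) :
    [c] <+: l.drop i ↔ l[i]? = some c := by
  constructor
  · rintro ⟨t, ht⟩
    have : (l.drop i)[0]? = some c := by rw [← ht]; simp
    simpa [List.getElem?_drop] using this
  · intro h
    refine ⟨(l.drop i).tail, ?_⟩
    have : (l.drop i)[0]? = some c := by simpa [List.getElem?_drop] using h
    cases hd : l.drop i with
    | nil => simp [hd] at this
    | cons a t => simp [hd] at this ⊢; exact this.symm

-- rfind = -1 → c not in l
theorem pvRfind_neg_one (l : List Char) (c : Char)
    (h : PySem.Chars.rfind l [c] = -1) : c ∉ l := by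
  intro hc
  obtain ⟨i, hi, hget⟩ := List.mem_iff_getElem.mp hc
  rcases pvGo_spec l c l.length with ⟨h1, h2⟩ | ⟨k, _, h1, _, _⟩
  · exact h2 i (le_of_lt hi) ((pvPrefix_drop_iff l c i).mpr (by simp [List.getElem?_eq_getElem hi, hget]))
  · rw [PySem.Chars.rfind] at h; rw [h] at h1; omega

-- rfind = k ≥ 0 → l[k] = c and no c strictly after k
theorem pvRfind_spec (l : List Char) (c : Char) (k : ℕ)
    (h : PySem.Chars.rfind l [c] = (k : ℤ)) :
    l[k]? = some c ∧ ∀ i, k < i → l[i]? ≠ some c := by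
  rcases pvGo_spec l c l.length with ⟨h1, _⟩ | ⟨k', hk', h1, h2, h3⟩
  · rw [PySem.Chars.rfind] at h; rw [h] at h1; omega
  · rw [PySem.Chars.rfind] at h; rw [h] at h1
    have hkk : k' = k := by exact_mod_cast h1.symm
    subst hkk
    refine ⟨(pvPrefix_drop_iff l c k').mp h2, ?_⟩
    intro i hlt hget
    by_cases hi : i ≤ l.length
    · exact h3 i hlt hi ((pvPrefix_drop_iff l c i).mpr hget)
    · rw [List.getElem?_eq_none (by omega)] at hget; simp at hget

-- for a pattern '.'::r with r dot-free: suffix of l ↔ equals the suffix at the LAST dot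
theorem pvSuffix_iff (l r : List Char) (k : ℕ)
    (hget : l[k]? = some '.') (hlast : ∀ i, k < i → l[i]? ≠ some '.')
    (hr : '.' ∉ r) :
    ('.' :: r) <:+ l ↔ l.drop k = '.' :: r := by
  constructor
  · rintro ⟨p, hp⟩
    have hlen : p.length + (r.length + 1) = l.length := by
      have := congrArg List.length hp; simpa [Nat.add_comm, Nat.add_left_comm] using this
    have hpdot : l[p.length]? = some '.' := by
      rw [← hp]; rw [List.getElem?_append_right (le_refl _)]; simp
    -- k ≤ p.length: any dot index > p.length would index into r
    have hk_le : k ≤ p.length := by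
      by_contra hgt
      push_neg at hgt
      have hidx : l[k]? = r[k - p.length - 1]? := by
        rw [← hp, List.getElem?_append_right (by omega)]
        have : k - p.length = (k - p.length - 1) + 1 := by omega
        rw [this]; simp
      rw [hidx] at hget
      exact hr (List.mem_of_getElem? hget)
    have hk_ge : p.length ≤ k := by
      by_contra hlt
      push_neg at hlt
      exact hlast p.length hlt hpdot
    have hk : k = p.length := le_antisymm hk_le hk_ge
    rw [hk, ← hp, List.drop_left]
  · intro h
    rw [← h]; exact List.drop_suffix k l

-- A's loop, given that endswith tld decides 'tld = S', is the membership test on S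
theorem pvLoopA_eq (hostname hl S : String) (L : List String)
    (h : ∀ t ∈ L, (PySem.Str.endswith hl t = true ↔ t = S)) :
    pvLoopA hostname hl L = if L.contains S then some (pvDict hostname S) else none := by
  induction L with
  | nil => simp [pvLoopA]
  | cons t rest ih =>
    by_cases ht : PySem.Str.endswith hl t = true
    · have hts : t = S := (h t (by simp)).mp ht
      subst hts
      simp only [pvLoopA, ht, if_true, List.contains_cons, BEq.rfl, Bool.true_or]
    · have hne : ¬ t = S := fun he => ht ((h t (by simp)).mpr he)
      have hf : PySem.Str.endswith hl t = false := by simpa using ht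
      have hbe : (S == t) = false := by simpa using fun he => hne he.symm
      simp only [pvLoopA, hf, Bool.false_eq_true, if_false, List.contains_cons, hbe, Bool.false_or]
      exact ih (fun t' ht' => h t' (by simp [ht']))

-- each TLD in the list starts with '.' and has no further dot
theorem pvTLDS_shape : ∀ t ∈ pvTLDS, t.toList = '.' :: t.toList.tail ∧ '.' ∉ t.toList.tail := by
  decide

-- ===== VERDICT (by name: the statement is the Claim_ definition above) =====
theorem check_suspicious_tld_py_spec : Claim_equal_check_suspicious_tld_py := by
  intro hostname _
  unfold Spec_check_suspicious_tld_py
  simp only [check_suspicious_tld_py, check_suspicious_tld_py_alt]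
  set hl := PySem.Str.lower hostname with hhl
  set l := hl.toList with hls
  have hrf : PySem.Str.rfind hl "." = PySem.Chars.rfind l ['.'] := by
    rw [PySem.Str.rfind_eq]
    rfl
  by_cases hneg : PySem.Str.rfind hl "." = -1
  · -- no dot: every endswith is false, both sides none
    have hnotin : '.' ∉ l := pvRfind_neg_one l '.' (by rw [← hrf]; exact hneg)
    have hall : ∀ t ∈ pvTLDS, PySem.Str.endswith hl t = false := by
      intro t ht
      obtain ⟨hshape, _⟩ := pvTLDS_shape t ht
      rw [PySem.Str.endswith_eq]
      by_contra hb
      have hT : PySem.Chars.endswith l t.toList = true := by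
        cases hc : PySem.Chars.endswith l t.toList with
        | false => exact absurd hc hb
        | true => rfl
      obtain ⟨p, hp⟩ := (PySem.Chars.endswith_iff l t.toList).mp hT
      rw [hshape] at hp
      exact hnotin (by rw [← hp]; simp)
    have hA : pvLoopA hostname hl pvTLDS = none := by
      have hgen : ∀ (L : List String), (∀ t ∈ L, PySem.Str.endswith hl t = false) →
          pvLoopA hostname hl L = none := by
        intro L
        induction L with
        | nil => intro _; rfl
        | cons t rest ih =>
          intro hL
          simp only [pvLoopA, hL t (by simp), Bool.false_eq_true, if_false]
          exact ih (fun t' ht' => hL t' (by simp [ht']))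
      exact hgen pvTLDS hall
    rw [hA, if_pos hneg]
  · -- a dot exists: rfind = k, extracted tld S = drop k, A's loop = membership test on S
    have hk' : ∃ k : ℕ, PySem.Chars.rfind l ['.'] = (k : ℤ) := by
      rcases pvGo_spec l '.' l.length with ⟨h1, _⟩ | ⟨k, _, h1, _, _⟩
      · exact absurd (by rw [hrf, PySem.Chars.rfind]; exact h1) hneg
      · exact ⟨k, by rw [PySem.Chars.rfind]; exact h1⟩
    obtain ⟨k, hk⟩ := hk'
    obtain ⟨hget, hlast⟩ := pvRfind_spec l '.' k hk
    have hidx : PySem.Str.rfind hl "." = (k : ℤ) := by rw [hrf]; exact hk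
    rw [hidx, if_neg (by omega : ¬ ((k : ℕ) : ℤ) = -1)]
    set S := PySem.Str.slice hl (some (k : ℤ)) none with hS
    have hSl : S.toList = l.drop k := by
      rw [hS, PySem.Str.slice]
      simp [PySem.Chars.slice]
      rfl
    have hiff : ∀ t ∈ pvTLDS, (PySem.Str.endswith hl t = true ↔ t = S) := by
      intro t ht
      obtain ⟨hshape, hr⟩ := pvTLDS_shape t ht
      rw [PySem.Str.endswith_eq, PySem.Chars.endswith_iff]
      have hsuf := pvSuffix_iff l t.toList.tail k hget hlast hr
      constructor
      · intro h
        rw [hshape] at h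
        have hdk := hsuf.mp h
        apply String.toList_inj.mp
        rw [hSl, hshape, hdk]
      · intro h
        rw [hshape]
        exact hsuf.mpr (by rw [← hshape, ← hSl, h])
    rw [pvLoopA_eq hostname hl S pvTLDS hiff]
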